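-- pv_equiv track=rewrite | github.com/ferindya/Tubes-TBFO-18 | CFGTOCNF.py | simplyfyVariabel
-- ===== SOURCE A (Python) =====
-- def simplyfyVariabel(CFG):
--     newProduction = {}
--     delProduction = {}
--
--     j = 0
--     for head, body in CFG.items():
--         for rule in body:
--             headsymbol = head
--             temprule = [r for r in rule]
--             if len(temprule) > 2:
--                 while(len(temprule)) > 2:
--                     newSymbol =  f"X{j}"
--                     if headsymbol not in newProduction.keys():
--                         newProduction[headsymbol] = [[temprule[0],newSymbol]]
--                     else:
--                         newProduction[headsymbol].append([temprule[0], newSymbol])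
--                     headsymbol = newSymbol
--                     temprule.remove(temprule[0])
--                     j += 1
--                 else:
--                     if headsymbol not in newProduction.keys():
--                         newProduction[headsymbol] = [temprule]
--                     else:
--                         newProduction[headsymbol].append(temprule)
--                     if head not in delProduction.keys():
--                         delProduction[head] = [rule]
--                     else:
--                         delProduction[head].append(rule)
--     for newhead, newbody in newProduction.items():
--         if newhead not in CFG.keys():
--             CFG[newhead] = newbody
--         else:
--             CFG[newhead].extend(newbody)
--     for delhead, delbody in delProduction.items():
--         for delrule in delbody:
--             CFG[delhead].remove(delrule)
--     return CFG
-- ===== SOURCE B (Python) =====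
-- def simplyfyVariabel(CFG):
--     # B: recursive binarization + per-head filter rebuild; no delProduction pass.
--     new = {}
--
--     def binarize(head, syms, j):
--         if len(syms) <= 2:
--             new.setdefault(head, []).append(syms)
--             return j
--         new.setdefault(head, []).append([syms[0], f"X{j}"])
--         return binarize(f"X{j}", syms[1:], j + 1)
--
--     j = 0
--     for head, body in CFG.items():
--         for rule in body:
--             if len(rule) > 2:
--                 j = binarize(head, list(rule), j)
--
--     for head in list(CFG):
--         CFG[head] = [r for r in CFG[head] if len(r) <= 2] + new.pop(head, [])
--     CFG.update(new)
--     return CFG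
-- ===== Notes on version B (the rewrite author's own statement) =====
-- stated objective: simpler
-- what changed: B binarizes each long rule with a recursive helper (setdefault-append) instead of A's while-loop with in-place element removal, and drops the delProduction bookkeeping and removal pass entirely: each head's rule list is rebuilt in one step as its short rules (a filter) plus its pending new productions (popped from the new-production dict), with the remaining fresh X-heads appended at the end.
import Mathlib
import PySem

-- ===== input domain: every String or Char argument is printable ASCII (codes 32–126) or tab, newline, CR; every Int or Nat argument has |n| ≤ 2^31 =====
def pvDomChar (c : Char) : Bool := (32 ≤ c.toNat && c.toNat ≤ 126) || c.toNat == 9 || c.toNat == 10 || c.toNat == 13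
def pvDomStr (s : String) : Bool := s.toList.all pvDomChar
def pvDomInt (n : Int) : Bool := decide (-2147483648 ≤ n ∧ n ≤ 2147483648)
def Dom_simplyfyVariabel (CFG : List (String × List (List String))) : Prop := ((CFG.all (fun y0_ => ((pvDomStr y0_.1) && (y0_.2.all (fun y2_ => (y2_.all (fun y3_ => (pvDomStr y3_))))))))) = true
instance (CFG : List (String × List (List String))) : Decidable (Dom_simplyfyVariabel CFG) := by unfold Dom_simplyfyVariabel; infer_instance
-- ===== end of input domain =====

-- B replaces the while-loop binarization by a recursive helper and drops the delProduction
-- pass entirely, rebuilding each head's rule list with a filter (objective: simpler; the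
-- equivalence proved is about the RETURN value — both Pythons mutate the argument dict in place).

-- ===== PORT A =====
-- 'if h not in newProduction.keys(): newProduction[h] = [[v]] else: newProduction[h].append(v)'
def pvAppendA (d : PySem.Dict String (List (List String))) (k : String) (v : List String) :
    PySem.Dict String (List (List String)) :=
  if d.contains k = false then d.insert k [v]
  else d.modify k [] (fun l => l ++ [v])

-- the inner 'while len(temprule) > 2' loop; 'temprule.remove(temprule[0])' removes the first
-- occurrence of the head element, i.e. the head itself, leaving the tail
def pvWhileA (newProd : PySem.Dict String (List (List String))) (headsymbol : String)
    (temprule : List String) (j : Int) :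
    PySem.Dict String (List (List String)) × String × List String × Int :=
  match temprule with
  | t0 :: t1 :: t2 :: rest =>
      let newSymbol := "X" ++ PySem.Int.toStr j
      pvWhileA (pvAppendA newProd headsymbol [t0, newSymbol]) newSymbol (t1 :: t2 :: rest) (j + 1)
  | _ => (newProd, headsymbol, temprule, j)

def simplyfyVariabel (CFG : List (String × List (List String))) : List (String × List (List String)) :=
  let cfg0 : PySem.Dict String (List (List String)) := PySem.Dict.mk CFG
  -- for head, body in CFG.items(): for rule in body: …
  let s :=
    cfg0.items.foldl (fun s hb =>
      hb.2.foldl (fun (s : PySem.Dict String (List (List String)) × PySem.Dict String (List (List String)) × Int) rule =>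
        -- s = (newProduction, delProduction, j); headsymbol starts as hb.1, temprule as rule
        if rule.length > 2 then
          -- run the while loop, then its 'else' clause: append the final two-symbol
          -- temprule under the last headsymbol, and record the original rule under head
          (pvAppendA (pvWhileA s.1 hb.1 rule s.2.2).1 (pvWhileA s.1 hb.1 rule s.2.2).2.1
             (pvWhileA s.1 hb.1 rule s.2.2).2.2.1,
           pvAppendA s.2.1 hb.1 rule,
           (pvWhileA s.1 hb.1 rule s.2.2).2.2.2)
        else s) s)
      (PySem.Dict.empty, PySem.Dict.empty, (0 : Int))
  -- for newhead, newbody in newProduction.items(): …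
  let cfg1 :=
    s.1.items.foldl (fun cfg kv =>
      if cfg.contains kv.1 = false then cfg.insert kv.1 kv.2
      else cfg.modify kv.1 [] (fun l => l ++ kv.2)) cfg0
  -- for delhead, delbody in delProduction.items(): for delrule in delbody: CFG[delhead].remove(delrule)
  let cfg2 :=
    s.2.1.items.foldl (fun cfg kv =>
      kv.2.foldl (fun cfg r =>
        -- '.remove' never raises here: delrule was recorded from CFG[delhead]; getD is unreachable
        cfg.modify kv.1 [] (fun l => (PySem.List.remove? l r).getD l)) cfg) cfg1
  cfg2.items

-- ===== PORT B =====
-- 'new.setdefault(head, []).append(v)'  ==  new[head] = new.get(head, []) + [v]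
def pvAddB (d : PySem.Dict String (List (List String))) (k : String) (v : List String) :
    PySem.Dict String (List (List String)) :=
  d.modify k [] (fun l => l ++ [v])

def pvBinarize (new : PySem.Dict String (List (List String))) (head : String)
    (syms : List String) (j : Int) : PySem.Dict String (List (List String)) × Int :=
  match syms with
  | s0 :: s1 :: s2 :: rest =>
      let x := "X" ++ PySem.Int.toStr j
      pvBinarize (pvAddB new head [s0, x]) x (s1 :: s2 :: rest) (j + 1)
  | _ => (pvAddB new head syms, j)

def simplyfyVariabel_alt (CFG : List (String × List (List String))) : List (String × List (List String)) :=
  let cfg0 : PySem.Dict String (List (List String)) := PySem.Dict.mk CFG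
  let s :=
    cfg0.items.foldl (fun s hb =>
      hb.2.foldl (fun (s : PySem.Dict String (List (List String)) × Int) rule =>
        if rule.length > 2 then pvBinarize s.1 hb.1 rule s.2 else s) s)
      (PySem.Dict.empty, (0 : Int))
  -- for head in list(CFG): CFG[head] = [r for r in CFG[head] if len(r) <= 2] + new.pop(head, [])
  let t :=
    cfg0.keys.foldl (fun (t : PySem.Dict String (List (List String)) × PySem.Dict String (List (List String))) head =>
      (t.1.insert head (((t.1.getD head []).filter (fun r => r.length ≤ 2)) ++ t.2.getD head []),
       t.2.erase head)) (cfg0, s.1)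
  -- CFG.update(new)
  (t.2.items.foldl (fun cfg kv => cfg.insert kv.1 kv.2) t.1).items

-- ===== PRECONDITION & SPEC =====
-- Pre_ only states the dict invariant of the input: the association list encodes a Python dict,
-- whose keys are necessarily distinct; it excludes no input the Python function can receive.
def Pre_simplyfyVariabel (CFG : List (String × List (List String))) : Prop :=
  (CFG.map Prod.fst).Nodup
instance (CFG : List (String × List (List String))) : Decidable (Pre_simplyfyVariabel CFG) := by
  unfold Pre_simplyfyVariabel; infer_instance

def pvWitness_simplyfyVariabel : (List (String × List (List String))) :=
  [("S", [["a", "S", "b", "c"], ["a"]]), ("A", [["a", "b"]])]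

def Spec_simplyfyVariabel (CFG : List (String × List (List String))) (out : List (String × List (List String))) : Prop := out = simplyfyVariabel_alt CFG
instance (CFG : List (String × List (List String))) (out : List (String × List (List String))) : Decidable (Spec_simplyfyVariabel CFG out) := by unfold Spec_simplyfyVariabel; infer_instance

-- ===== CLAIM (what is proved, stated in full; the proofs are below) =====
def Claim_equal_simplyfyVariabel : Prop := ∀ (CFG : List (String × List (List String))), Dom_simplyfyVariabel CFG → Pre_simplyfyVariabel CFG → Spec_simplyfyVariabel CFG (simplyfyVariabel CFG)

-- ===== LEMMAS AND PROOFS =====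

abbrev Dct := PySem.Dict String (List (List String))

-- the predicate "rule is long" and the two filters the proofs talk about
abbrev isLong (r : List String) : Bool := decide (r.length > 2)
abbrev isShort (r : List String) : Bool := decide (r.length ≤ 2)

-- pvAppendA and pvAddB are the same dict-append
theorem appendA_eq_addB (d : Dct) (k : String) (v : List String) :
    pvAppendA d k v = pvAddB d k v := by
  unfold pvAppendA pvAddB
  by_cases h : d.contains k = false
  · simp [h, PySem.Dict.modify, PySem.Dict.getD_of_not_contains _ _ h]
  · simp [h]

-- keys stay Nodup through pvAddB
theorem nodup_keys_addB (d : Dct) (k : String) (v : List String)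
    (h : d.keys.Nodup) : (pvAddB d k v).keys.Nodup := by
  unfold pvAddB
  rw [PySem.Dict.keys_modify]
  exact (PySem.Dict.nodup_keys_insert _ _ _ h)

-- getD through pvAddB
theorem getD_addB (d : Dct) (k q : String) (v : List String) :
    (pvAddB d k v).getD q [] = if q = k then d.getD q [] ++ [v] else d.getD q [] := by
  unfold pvAddB
  rw [PySem.Dict.getD_modify]
  by_cases h : q = k
  · simp [h]
  · simp [h]

-- the while loop followed by its else-append IS the recursive binarizer
theorem binarize_eq_while (syms : List String) : ∀ (n : Dct) (h : String) (j : Int),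
    pvBinarize n h syms j =
      (pvAppendA (pvWhileA n h syms j).1 (pvWhileA n h syms j).2.1 (pvWhileA n h syms j).2.2.1,
       (pvWhileA n h syms j).2.2.2) := by
  induction syms with
  | nil => intro n h j; simp [pvBinarize, pvWhileA, appendA_eq_addB]
  | cons s0 tail IH =>
    intro n h j
    match tail with
    | [] => simp [pvBinarize, pvWhileA, appendA_eq_addB]
    | [s1] => simp [pvBinarize, pvWhileA, appendA_eq_addB]
    | s1 :: s2 :: rest =>
      show pvBinarize n h (s0 :: s1 :: s2 :: rest) j = _
      rw [show pvBinarize n h (s0 :: s1 :: s2 :: rest) j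
            = pvBinarize (pvAddB n h [s0, "X" ++ PySem.Int.toStr j]) ("X" ++ PySem.Int.toStr j)
                (s1 :: s2 :: rest) (j + 1) from rfl,
          show pvWhileA n h (s0 :: s1 :: s2 :: rest) j
            = pvWhileA (pvAppendA n h [s0, "X" ++ PySem.Int.toStr j]) ("X" ++ PySem.Int.toStr j)
                (s1 :: s2 :: rest) (j + 1) from rfl]
      rw [IH _ _ _]
      simp only [appendA_eq_addB]

-- pvBinarize preserves Nodup keys and all-short values
theorem binarize_pres (syms : List String) : ∀ (n : Dct) (h : String) (j : Int),
    n.keys.Nodup → (∀ q r, r ∈ n.getD q [] → r.length ≤ 2) →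
    (pvBinarize n h syms j).1.keys.Nodup ∧
      (∀ q r, r ∈ (pvBinarize n h syms j).1.getD q [] → r.length ≤ 2) := by
  induction syms with
  | nil =>
    intro n h j hnd hsh
    refine ⟨nodup_keys_addB _ _ _ hnd, fun q r hr => ?_⟩
    rw [show (pvBinarize n h [] j).1 = pvAddB n h [] from rfl] at hr
    rw [getD_addB] at hr
    by_cases hq : q = h
    · simp [hq] at hr
      rcases hr with hr | hr
      · exact hsh _ _ (by simpa [hq] using hr)
      · simp [hr]
    · exact hsh _ _ (by simpa [hq] using hr)
  | cons s0 tail IH =>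
    intro n h j hnd hsh
    match tail with
    | [] =>
      refine ⟨nodup_keys_addB _ _ _ hnd, fun q r hr => ?_⟩
      rw [show (pvBinarize n h [s0] j).1 = pvAddB n h [s0] from rfl, getD_addB] at hr
      by_cases hq : q = h
      · simp [hq] at hr
        rcases hr with hr | hr
        · exact hsh _ _ (by simpa [hq] using hr)
        · simp [hr]
      · exact hsh _ _ (by simpa [hq] using hr)
    | [s1] =>
      refine ⟨nodup_keys_addB _ _ _ hnd, fun q r hr => ?_⟩
      rw [show (pvBinarize n h [s0, s1] j).1 = pvAddB n h [s0, s1] from rfl, getD_addB] at hr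
      by_cases hq : q = h
      · simp [hq] at hr
        rcases hr with hr | hr
        · exact hsh _ _ (by simpa [hq] using hr)
        · simp [hr]
      · exact hsh _ _ (by simpa [hq] using hr)
    | s1 :: s2 :: rest =>
      rw [show pvBinarize n h (s0 :: s1 :: s2 :: rest) j
            = pvBinarize (pvAddB n h [s0, "X" ++ PySem.Int.toStr j]) ("X" ++ PySem.Int.toStr j)
                (s1 :: s2 :: rest) (j + 1) from rfl]
      refine IH _ _ _ (nodup_keys_addB _ _ _ hnd) (fun q r hr => ?_)
      rw [getD_addB] at hr
      by_cases hq : q = h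
      · simp [hq] at hr
        rcases hr with hr | hr
        · exact hsh _ _ (by simpa [hq] using hr)
        · simp [hr]
      · exact hsh _ _ (by simpa [hq] using hr)

-- ===== phase 1: A's fold = (B's fold, delProduction fold) =====

theorem phase1_body (body : List (List String)) (hd : String) :
    ∀ (n d : Dct) (j : Int),
    body.foldl (fun s rule =>
        if rule.length > 2 then
          (pvAppendA (pvWhileA s.1 hd rule s.2.2).1 (pvWhileA s.1 hd rule s.2.2).2.1
             (pvWhileA s.1 hd rule s.2.2).2.2.1,
           pvAppendA s.2.1 hd rule,
           (pvWhileA s.1 hd rule s.2.2).2.2.2)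
        else s) (n, d, j)
    = ((body.foldl (fun s rule => if rule.length > 2 then pvBinarize s.1 hd rule s.2 else s) (n, j)).1,
       body.foldl (fun d rule => if rule.length > 2 then pvAppendA d hd rule else d) d,
       (body.foldl (fun s rule => if rule.length > 2 then pvBinarize s.1 hd rule s.2 else s) (n, j)).2) := by
  induction body with
  | nil => intro n d j; rfl
  | cons rule rest IH =>
    intro n d j
    simp only [List.foldl_cons]
    by_cases hl : rule.length > 2
    · simp only [if_pos hl]
      rw [show (pvAppendA (pvWhileA n hd rule j).1 (pvWhileA n hd rule j).2.1
            (pvWhileA n hd rule j).2.2.1, pvAppendA d hd rule, (pvWhileA n hd rule j).2.2.2)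
          = ((pvBinarize n hd rule j).1, pvAppendA d hd rule, (pvBinarize n hd rule j).2) from by
            rw [binarize_eq_while]]
      rw [IH]
    · simp only [if_neg hl]
      exact IH n d j

theorem phase1_items (its : List (String × List (List String))) :
    ∀ (n d : Dct) (j : Int),
    its.foldl (fun s hb =>
      hb.2.foldl (fun (s : Dct × Dct × Int) rule =>
        if rule.length > 2 then
          (pvAppendA (pvWhileA s.1 hb.1 rule s.2.2).1 (pvWhileA s.1 hb.1 rule s.2.2).2.1
             (pvWhileA s.1 hb.1 rule s.2.2).2.2.1,
           pvAppendA s.2.1 hb.1 rule,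
           (pvWhileA s.1 hb.1 rule s.2.2).2.2.2)
        else s) s) (n, d, j)
    = ((its.foldl (fun s hb =>
          hb.2.foldl (fun (s : Dct × Int) rule =>
            if rule.length > 2 then pvBinarize s.1 hb.1 rule s.2 else s) s) (n, j)).1,
       its.foldl (fun d hb =>
          hb.2.foldl (fun d rule => if rule.length > 2 then pvAppendA d hb.1 rule else d) d) d,
       (its.foldl (fun s hb =>
          hb.2.foldl (fun (s : Dct × Int) rule =>
            if rule.length > 2 then pvBinarize s.1 hb.1 rule s.2 else s) s) (n, j)).2) := by
  induction its with
  | nil => intro n d j; rfl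
  | cons hb rest IH =>
    intro n d j
    simp only [List.foldl_cons]
    rw [phase1_body hb.2 hb.1 n d j, IH]

-- the N produced by phase 1 has Nodup keys and all-short values
theorem phase1_N_pres (its : List (String × List (List String))) :
    ∀ (n : Dct) (j : Int),
    n.keys.Nodup → (∀ q r, r ∈ n.getD q [] → r.length ≤ 2) →
    (its.foldl (fun s hb =>
        hb.2.foldl (fun (s : Dct × Int) rule =>
          if rule.length > 2 then pvBinarize s.1 hb.1 rule s.2 else s) s) (n, j)).1.keys.Nodup ∧
      (∀ q r, r ∈ (its.foldl (fun s hb =>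
        hb.2.foldl (fun (s : Dct × Int) rule =>
          if rule.length > 2 then pvBinarize s.1 hb.1 rule s.2 else s) s) (n, j)).1.getD q [] →
        r.length ≤ 2) := by
  induction its with
  | nil => intro n j h1 h2; exact ⟨h1, h2⟩
  | cons hb rest IH =>
    intro n j h1 h2
    simp only [List.foldl_cons]
    have hbody : ∀ (body : List (List String)) (n : Dct) (j : Int),
        n.keys.Nodup → (∀ q r, r ∈ n.getD q [] → r.length ≤ 2) →
        (body.foldl (fun (s : Dct × Int) rule =>
          if rule.length > 2 then pvBinarize s.1 hb.1 rule s.2 else s) (n, j)).1.keys.Nodup ∧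
        (∀ q r, r ∈ (body.foldl (fun (s : Dct × Int) rule =>
          if rule.length > 2 then pvBinarize s.1 hb.1 rule s.2 else s) (n, j)).1.getD q [] →
          r.length ≤ 2) := by
      intro body
      induction body with
      | nil => intro n j h1 h2; exact ⟨h1, h2⟩
      | cons rule rrest IHb =>
        intro n j h1 h2
        simp only [List.foldl_cons]
        by_cases hl : rule.length > 2
        · simp only [if_pos hl]
          obtain ⟨p1, p2⟩ := binarize_pres rule n hb.1 j h1 h2
          have := IHb (pvBinarize n hb.1 rule j).1 (pvBinarize n hb.1 rule j).2 p1 p2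
          simpa using this
        · simp only [if_neg hl]
          exact IHb n j h1 h2
    obtain ⟨p1, p2⟩ := hbody hb.2 n j h1 h2
    have := IH (hb.2.foldl (fun (s : Dct × Int) rule =>
        if rule.length > 2 then pvBinarize s.1 hb.1 rule s.2 else s) (n, j)).1
      (hb.2.foldl (fun (s : Dct × Int) rule =>
        if rule.length > 2 then pvBinarize s.1 hb.1 rule s.2 else s) (n, j)).2 p1 p2
    simpa using this

-- ===== the delProduction dict, pointwise =====

-- the delProduction fold is the flat modify-append fold over all (head, long rule) pairs
theorem dfold_flat (its : List (String × List (List String))) : ∀ (d : Dct),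
    its.foldl (fun d hb =>
        hb.2.foldl (fun d rule => if rule.length > 2 then pvAppendA d hb.1 rule else d) d) d
    = (its.flatMap (fun hb => (hb.2.filter isLong).map (fun r => (hb.1, r)))).foldl
        (fun d p => d.modify p.1 [] (fun l => l ++ [p.2])) d := by
  have hbody : ∀ (hd : String) (body : List (List String)) (d : Dct),
      body.foldl (fun d rule => if rule.length > 2 then pvAppendA d hd rule else d) d
      = ((body.filter isLong).map (fun r => (hd, r))).foldl
          (fun d p => d.modify p.1 [] (fun l => l ++ [p.2])) d := by
    intro hd body
    induction body with
    | nil => intro d; rfl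
    | cons rule rest IHb =>
      intro d
      by_cases hl : rule.length > 2
      · simp only [List.foldl_cons, List.filter_cons, isLong, decide_eq_true_eq, hl,
          if_true, List.map_cons]
        rw [IHb, appendA_eq_addB]
        rfl
      · simp only [List.foldl_cons, List.filter_cons, isLong, decide_eq_true_eq, hl,
          if_false]
        rw [IHb]
  induction its with
  | nil => intro d; rfl
  | cons hb rest IH =>
    intro d
    simp only [List.foldl_cons, List.flatMap_cons, List.foldl_append]
    rw [hbody hb.1 hb.2 d, IH]

-- filtering the flat (head, long rule) list at a key
theorem flat_filter_nil (its : List (String × List (List String))) :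
    ∀ q, q ∉ its.map Prod.fst →
    (its.flatMap (fun hb => (hb.2.filter isLong).map (fun r => (hb.1, r)))).filter
      (fun p => p.1 == q) = [] := by
  induction its with
  | nil => intro q _; rfl
  | cons hb rest IH =>
    intro q hq
    simp only [List.map_cons, List.mem_cons] at hq
    push Not at hq
    simp only [List.flatMap_cons, List.filter_append, List.filter_map]
    rw [IH q hq.2]
    have : (fun r => (fun (p : String × List String) => p.1 == q) ((fun r => (hb.1, r)) r))
        = fun _ => false := by
      funext r; simp; exact fun e => hq.1 e.symm
    simp [Function.comp_def, this]

theorem flat_filter_mem (its : List (String × List (List String)))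
    (hnd : (its.map Prod.fst).Nodup) :
    ∀ q b, (q, b) ∈ its →
    (its.flatMap (fun hb => (hb.2.filter isLong).map (fun r => (hb.1, r)))).filter
      (fun p => p.1 == q) = (b.filter isLong).map (fun r => (q, r)) := by
  induction its with
  | nil => intro q b h; simp at h
  | cons hb rest IH =>
    intro q b hmem
    simp only [List.flatMap_cons, List.filter_append, List.filter_map]
    rcases List.mem_cons.mp hmem with heq | hrest
    · subst heq
      have hq : q ∉ rest.map Prod.fst := by
        simp only [List.map_cons] at hnd
        exact (List.nodup_cons.mp hnd).1
      rw [flat_filter_nil rest q hq]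
      have : (fun r => (fun (p : String × List String) => p.1 == q) ((fun r => (q, r)) r))
          = fun _ => true := by funext r; simp
      simp [Function.comp_def]
    · have hne : hb.1 ≠ q := by
        simp only [List.map_cons] at hnd
        intro he
        exact (List.nodup_cons.mp hnd).1 (he ▸ (List.mem_map.mpr ⟨(q, b), hrest, rfl⟩))
      have : (fun r => (fun (p : String × List String) => p.1 == q) ((fun r => (hb.1, r)) r))
          = fun _ => false := by funext r; simp [hne]
      simp only [Function.comp_def, this, List.filter_false]
      exact IH ((List.nodup_cons.mp (by simpa using hnd)).2) q b hrest

-- Nodup keys and key membership through the flat modify-append fold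
theorem flatfold_keys (L : List (String × List String)) :
    ∀ (d : Dct), d.keys.Nodup →
    ((L.foldl (fun d p => d.modify p.1 [] (fun l => l ++ [p.2])) d).keys.Nodup ∧
     ∀ q, q ∈ (L.foldl (fun d p => d.modify p.1 [] (fun l => l ++ [p.2])) d).keys →
       q ∈ d.keys ∨ q ∈ L.map Prod.fst) := by
  induction L with
  | nil => intro d h; exact ⟨h, fun q hq => Or.inl hq⟩
  | cons p rest IH =>
    intro d h
    simp only [List.foldl_cons]
    have h1 : (d.modify p.1 [] (fun l => l ++ [p.2])).keys.Nodup := nodup_keys_addB d p.1 p.2 h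
    obtain ⟨n1, n2⟩ := IH _ h1
    refine ⟨n1, fun q hq => ?_⟩
    rcases n2 q hq with hq' | hq'
    · rw [PySem.Dict.keys_modify] at hq'
      rcases (PySem.Dict.mem_keys_insert _ _ _ _).mp hq' with he | hd
      · exact Or.inr (by simp [he])
      · exact Or.inl hd
    · exact Or.inr (by simp [hq'])

theorem dfold_getD (its : List (String × List (List String)))
    (hnd : (its.map Prod.fst).Nodup) :
    (∀ q b, (q, b) ∈ its →
      (its.foldl (fun d hb =>
        hb.2.foldl (fun d rule => if rule.length > 2 then pvAppendA d hb.1 rule else d) d)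
        (PySem.Dict.empty : Dct)).getD q [] = b.filter isLong) ∧
    (∀ q, q ∉ its.map Prod.fst →
      (its.foldl (fun d hb =>
        hb.2.foldl (fun d rule => if rule.length > 2 then pvAppendA d hb.1 rule else d) d)
        (PySem.Dict.empty : Dct)).getD q [] = []) := by
  constructor
  · intro q b hmem
    rw [dfold_flat, PySem.Dict.getD_foldl_modify_append,
      flat_filter_mem its hnd q b hmem]
    simp
  · intro q hq
    rw [dfold_flat, PySem.Dict.getD_foldl_modify_append, flat_filter_nil its q hq]
    simp

theorem dfold_keys (its : List (String × List (List String))) :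
    (its.foldl (fun d hb =>
        hb.2.foldl (fun d rule => if rule.length > 2 then pvAppendA d hb.1 rule else d) d)
        (PySem.Dict.empty : Dct)).keys.Nodup ∧
    ∀ q, q ∈ (its.foldl (fun d hb =>
        hb.2.foldl (fun d rule => if rule.length > 2 then pvAppendA d hb.1 rule else d) d)
        (PySem.Dict.empty : Dct)).keys → q ∈ its.map Prod.fst := by
  rw [dfold_flat]
  obtain ⟨n1, n2⟩ := flatfold_keys
    (its.flatMap (fun hb => (hb.2.filter isLong).map (fun r => (hb.1, r))))
    (PySem.Dict.empty : Dct) (by simp)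
  refine ⟨n1, fun q hq => ?_⟩
  rcases n2 q hq with h | h
  · simp [PySem.Dict.keys_empty] at h
  · rcases List.mem_map.mp h with ⟨p, hp, rfl⟩
    rcases List.mem_flatMap.mp hp with ⟨hb, hhb, hin⟩
    rcases List.mem_map.mp hin with ⟨r, _, rfl⟩
    exact List.mem_map.mpr ⟨hb, hhb, rfl⟩

-- ===== A's merge phase, pointwise =====

theorem mergeA_char (ns : List (String × List (List String))) :
    ∀ (cfg : Dct), (ns.map Prod.fst).Nodup →
    (ns.foldl (fun cfg kv =>
        if cfg.contains kv.1 = false then cfg.insert kv.1 kv.2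
        else cfg.modify kv.1 [] (fun l => l ++ kv.2)) cfg).keys
      = cfg.keys ++ (ns.filter (fun kv => cfg.contains kv.1 = false)).map Prod.fst ∧
    ∀ q, (ns.foldl (fun cfg kv =>
        if cfg.contains kv.1 = false then cfg.insert kv.1 kv.2
        else cfg.modify kv.1 [] (fun l => l ++ kv.2)) cfg).getD q []
      = cfg.getD q [] ++ (PySem.Dict.mk ns).getD q [] := by
  induction ns with
  | nil =>
    intro cfg _
    exact ⟨by simp, fun q => by simp [PySem.Dict.getD, PySem.Dict.get?]⟩
  | cons kv rest IH =>
    intro cfg hnd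
    simp only [List.map_cons, List.nodup_cons] at hnd
    obtain ⟨hk, hnd'⟩ := hnd
    simp only [List.foldl_cons]
    by_cases hc : cfg.contains kv.1 = false
    · simp only [if_pos hc]
      obtain ⟨ih1, ih2⟩ := IH (cfg.insert kv.1 kv.2) hnd'
      have hfc : rest.filter (fun p => decide ((cfg.insert kv.1 kv.2).contains p.1 = false))
          = rest.filter (fun p => decide (cfg.contains p.1 = false)) := by
        apply List.filter_congr
        intro p hp
        have hne : p.1 ≠ kv.1 := fun e => hk (e ▸ List.mem_map.mpr ⟨p, hp, rfl⟩)
        rw [PySem.Dict.contains_insert]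
        simp [hne]
      constructor
      · rw [ih1, PySem.Dict.keys_insert_of_not_contains _ _ hc, hfc,
          List.filter_cons_of_pos (by simp [hc])]
        simp [List.append_assoc]
      · intro q
        rw [ih2 q]
        by_cases hq : q = kv.1
        · rw [hq, PySem.Dict.getD_insert_self, PySem.Dict.getD_of_not_contains _ _ hc]
          have hnone : (PySem.Dict.mk rest).get? kv.1 = none := by
            rw [PySem.Dict.get?_eq_none_iff_not_mem_keys]
            simpa using hk
          have hcons : (PySem.Dict.mk (kv :: rest)).getD kv.1 [] = kv.2 := by
            cases kv with
            | mk k2 v2 => simp [PySem.Dict.getD, PySem.Dict.get?_mk_cons]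
          rw [hcons]
          simp [PySem.Dict.getD, hnone]
        · rw [PySem.Dict.getD_insert_of_ne _ _ _ hq]
          have hb : (kv.1 == q) = false := by simp; exact fun e => hq e.symm
          have hcons : (PySem.Dict.mk (kv :: rest)).getD q [] = (PySem.Dict.mk rest).getD q [] := by
            cases kv with
            | mk k2 v2 => simp only [PySem.Dict.getD, PySem.Dict.get?_mk_cons, hb]; rfl
          rw [hcons]
    · simp only [if_neg hc]
      have hc' : cfg.contains kv.1 = true := by
        cases h : cfg.contains kv.1
        · exact absurd h hc
        · rfl
      obtain ⟨ih1, ih2⟩ := IH (cfg.modify kv.1 [] (fun l => l ++ kv.2)) hnd'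
      have hfc : rest.filter (fun p => decide ((cfg.modify kv.1 [] (fun l => l ++ kv.2)).contains p.1 = false))
          = rest.filter (fun p => decide (cfg.contains p.1 = false)) := by
        apply List.filter_congr
        intro p hp
        have hne : p.1 ≠ kv.1 := fun e => hk (e ▸ List.mem_map.mpr ⟨p, hp, rfl⟩)
        rw [PySem.Dict.contains_modify]
        simp [hne]
      constructor
      · rw [ih1, hfc, PySem.Dict.keys_modify, PySem.Dict.keys_insert_of_contains _ _ hc',
          List.filter_cons_of_neg (by simp [hc'])]
      · intro q
        rw [ih2 q, PySem.Dict.getD_modify]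
        by_cases hq : q = kv.1
        · simp only [if_pos hq]
          have hnone : (PySem.Dict.mk rest).get? kv.1 = none := by
            rw [PySem.Dict.get?_eq_none_iff_not_mem_keys]
            simpa using hk
          have hcons : (PySem.Dict.mk (kv :: rest)).getD kv.1 [] = kv.2 := by
            cases kv with
            | mk k2 v2 => simp [PySem.Dict.getD, PySem.Dict.get?_mk_cons]
          rw [hq, hcons]
          simp [PySem.Dict.getD, hnone]
        · simp only [if_neg hq]
          have hb : (kv.1 == q) = false := by simp; exact fun e => hq e.symm
          have hcons : (PySem.Dict.mk (kv :: rest)).getD q [] = (PySem.Dict.mk rest).getD q [] := by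
            cases kv with
            | mk k2 v2 => simp only [PySem.Dict.getD, PySem.Dict.get?_mk_cons, hb]; rfl
          rw [hcons]

-- ===== A's removal phase, pointwise =====

theorem removal_inner (v : List (List String)) (k : String) :
    ∀ (cfg : Dct), cfg.contains k = true →
    ((v.foldl (fun cfg r =>
        cfg.modify k [] (fun l => (PySem.List.remove? l r).getD l)) cfg).keys = cfg.keys ∧
     ∀ q, (v.foldl (fun cfg r =>
        cfg.modify k [] (fun l => (PySem.List.remove? l r).getD l)) cfg).getD q []
      = if q = k then v.foldl (fun l r => (PySem.List.remove? l r).getD l) (cfg.getD k []) else cfg.getD q []) := by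
  induction v with
  | nil =>
    intro cfg _
    refine ⟨rfl, fun q => ?_⟩
    by_cases hq : q = k
    · subst hq; simp
    · simp [hq]
  | cons r vrest IH =>
    intro cfg hck
    simp only [List.foldl_cons]
    have hck1 : (cfg.modify k [] (fun l => (PySem.List.remove? l r).getD l)).contains k = true := by
      rw [PySem.Dict.contains_modify]; simp
    obtain ⟨ih1, ih2⟩ := IH _ hck1
    constructor
    · rw [ih1, PySem.Dict.keys_modify, PySem.Dict.keys_insert_of_contains _ _ hck]
    · intro q
      rw [ih2 q]
      by_cases hq : q = k
      · subst hq
        rw [PySem.Dict.getD_modify]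
        simp
      · simp only [if_neg hq]
        rw [PySem.Dict.getD_modify, if_neg hq]

theorem removal_char (ds : List (String × List (List String))) :
    ∀ (cfg : Dct), (ds.map Prod.fst).Nodup → (∀ kv ∈ ds, cfg.contains kv.1 = true) →
    (ds.foldl (fun cfg kv =>
      kv.2.foldl (fun cfg r =>
        cfg.modify kv.1 [] (fun l => (PySem.List.remove? l r).getD l)) cfg) cfg).keys = cfg.keys ∧
    ∀ q, (ds.foldl (fun cfg kv =>
      kv.2.foldl (fun cfg r =>
        cfg.modify kv.1 [] (fun l => (PySem.List.remove? l r).getD l)) cfg) cfg).getD q []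
      = match (PySem.Dict.mk ds).get? q with
        | some v => v.foldl (fun l r => (PySem.List.remove? l r).getD l) (cfg.getD q [])
        | none => cfg.getD q [] := by
  induction ds with
  | nil =>
    intro cfg _ _
    exact ⟨rfl, fun q => by simp [PySem.Dict.get?]⟩
  | cons kv rest IH =>
    intro cfg hnd hcont
    simp only [List.map_cons, List.nodup_cons] at hnd
    obtain ⟨hk, hnd'⟩ := hnd
    simp only [List.foldl_cons]
    obtain ⟨in1, in2⟩ := removal_inner kv.2 kv.1 cfg (hcont kv (by simp))
    have hcont' : ∀ p ∈ rest,
        (kv.2.foldl (fun cfg r => cfg.modify kv.1 [] (fun l => (PySem.List.remove? l r).getD l)) cfg).contains p.1 = true := by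
      intro p hp
      rw [PySem.Dict.contains_eq_decide_mem_keys, in1, ← PySem.Dict.contains_eq_decide_mem_keys]
      exact hcont p (by simp [hp])
    obtain ⟨ih1, ih2⟩ := IH _ hnd' hcont'
    refine ⟨by rw [ih1, in1], fun q => ?_⟩
    rw [ih2 q]
    by_cases hq : q = kv.1
    · have hnone : (PySem.Dict.mk rest).get? kv.1 = none := by
        rw [PySem.Dict.get?_eq_none_iff_not_mem_keys]
        simpa using hk
      have hcons : (PySem.Dict.mk (kv :: rest)).get? kv.1 = some kv.2 := by
        cases kv with
        | mk k2 v2 => simp [PySem.Dict.get?_mk_cons]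
      rw [hq]
      simp only [hnone, hcons]
      rw [in2 kv.1]
      simp
    · have hb : (kv.1 == q) = false := by simp; exact fun e => hq e.symm
      have hcons : (PySem.Dict.mk (kv :: rest)).get? q = (PySem.Dict.mk rest).get? q := by
        cases kv with
        | mk k2 v2 => simp [PySem.Dict.get?_mk_cons, hb]
      rw [hcons, in2 q, if_neg hq]

-- removing the first occurrences of exactly the long rules is filtering them out
theorem removeFold_cons (rs : List (List String)) (a : List String)
    (ha : ∀ r ∈ rs, r ≠ a) : ∀ (xs : List (List String)),
    rs.foldl (fun l r => (PySem.List.remove? l r).getD l) (a :: xs)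
      = a :: rs.foldl (fun l r => (PySem.List.remove? l r).getD l) xs := by
  induction rs with
  | nil => intro xs; rfl
  | cons r rs' IH =>
    intro xs
    simp only [List.foldl_cons]
    have hr : r ≠ a := ha r (by simp)
    have hba : (a == r) = false := by simp; exact fun e => hr e.symm
    have hstep : (PySem.List.remove? (a :: xs) r).getD (a :: xs)
        = a :: (PySem.List.remove? xs r).getD xs := by
      simp only [PySem.List.remove?, List.idxOf?_cons, hba]
      cases h : List.idxOf? r xs with
      | none => simp
      | some i => simp [List.eraseIdx_cons_succ]
    rw [hstep, IH (fun r hr => ha r (by simp [hr]))]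

theorem remove_eq_filter (b : List (List String)) : ∀ (t : List (List String)),
    (∀ r ∈ t, r.length ≤ 2) →
    (b.filter isLong).foldl (fun l r => (PySem.List.remove? l r).getD l) (b ++ t)
      = b.filter isShort ++ t := by
  induction b with
  | nil => intro t _; simp
  | cons a b' IH =>
    intro t ht
    by_cases hl : a.length > 2
    · have h1 : (a :: b').filter isLong = a :: b'.filter isLong := by
        simp [isLong, hl]
      have h2 : (a :: b').filter isShort = b'.filter isShort := by
        simp [List.filter_cons, isShort]; omega
      rw [h1, h2, List.cons_append, List.foldl_cons]
      have hfirst : (PySem.List.remove? (a :: (b' ++ t)) a).getD (a :: (b' ++ t)) = b' ++ t := by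
        simp [PySem.List.remove?, List.idxOf?_cons]
      rw [hfirst]
      exact IH t ht
    · have h1 : (a :: b').filter isLong = b'.filter isLong := by
        simp [isLong, hl]
      have h2 : (a :: b').filter isShort = a :: b'.filter isShort := by
        simp [List.filter_cons, isShort]; omega
      rw [h1, h2, List.cons_append]
      have hne : ∀ r ∈ b'.filter isLong, r ≠ a := by
        intro r hrm
        have : r.length > 2 := by
          have := List.of_mem_filter hrm
          simpa [isLong] using this
        intro e
        subst e
        omega
      rw [removeFold_cons _ a hne (b' ++ t), IH t ht]
      rfl

-- ===== B's phase 2, pointwise =====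

theorem get?_erase_of_ne (d : Dct) (k q : String) (h : q ≠ k) :
    (d.erase k).get? q = d.get? q := by
  rcases d with ⟨items⟩
  induction items with
  | nil => rfl
  | cons p rest ih =>
    rw [PySem.Dict.get?_mk_cons]
    by_cases hp : p.1 = k
    · have h1 : (PySem.Dict.mk (p :: rest)).erase k = (PySem.Dict.mk rest).erase k := by
        simp [PySem.Dict.erase, hp]
      rw [h1, ih]
      have hb : (p.1 == q) = false := by subst hp; simp; exact fun e => h e.symm
      simp [hb]
    · have h1 : (PySem.Dict.mk (p :: rest)).erase k
          = PySem.Dict.mk (p :: ((PySem.Dict.mk rest).erase k).items) := by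
        simp [PySem.Dict.erase, hp]
      rw [h1, PySem.Dict.get?_mk_cons]
      by_cases hq : p.1 = q
      · simp [hq]
      · have hb : (p.1 == q) = false := by simp [hq]
        simp only [hb]
        exact ih

theorem bphase_char (ks : List String) :
    ∀ (cfg new : Dct), ks.Nodup → (∀ k ∈ ks, cfg.contains k = true) →
    (ks.foldl (fun (t : Dct × Dct) head =>
        (t.1.insert head (((t.1.getD head []).filter (fun r => r.length ≤ 2)) ++ t.2.getD head []),
         t.2.erase head)) (cfg, new)).2 = ks.foldl (fun n k => n.erase k) new ∧
    (ks.foldl (fun (t : Dct × Dct) head =>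
        (t.1.insert head (((t.1.getD head []).filter (fun r => r.length ≤ 2)) ++ t.2.getD head []),
         t.2.erase head)) (cfg, new)).1.keys = cfg.keys ∧
    ∀ q, (ks.foldl (fun (t : Dct × Dct) head =>
        (t.1.insert head (((t.1.getD head []).filter (fun r => r.length ≤ 2)) ++ t.2.getD head []),
         t.2.erase head)) (cfg, new)).1.getD q []
      = if q ∈ ks then (cfg.getD q []).filter (fun r => r.length ≤ 2) ++ new.getD q []
        else cfg.getD q [] := by
  induction ks with
  | nil =>
    intro cfg new _ _
    exact ⟨rfl, rfl, fun q => by simp⟩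
  | cons k ks' IH =>
    intro cfg new hnd hcont
    simp only [List.nodup_cons] at hnd
    obtain ⟨hk, hnd'⟩ := hnd
    have hck : cfg.contains k = true := hcont k (by simp)
    simp only [List.foldl_cons]
    have hkeys1 : (cfg.insert k (((cfg.getD k []).filter (fun r => r.length ≤ 2)) ++ new.getD k [])).keys = cfg.keys :=
      PySem.Dict.keys_insert_of_contains _ _ hck
    have hcont' : ∀ x ∈ ks',
        (cfg.insert k (((cfg.getD k []).filter (fun r => r.length ≤ 2)) ++ new.getD k [])).contains x = true := by
      intro x hx
      rw [PySem.Dict.contains_eq_decide_mem_keys, hkeys1, ← PySem.Dict.contains_eq_decide_mem_keys]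
      exact hcont x (by simp [hx])
    obtain ⟨ih1, ih2, ih3⟩ := IH _ _ hnd' hcont'
    refine ⟨ih1, by rw [ih2, hkeys1], fun q => ?_⟩
    rw [ih3 q]
    by_cases hq : q = k
    · subst hq
      have hq' : q ∉ ks' := hk
      simp only [if_neg hq', List.mem_cons, true_or, if_true]
      rw [PySem.Dict.getD_insert_self]
    · by_cases hq2 : q ∈ ks'
      · have h1 : q ∈ k :: ks' := by simp [hq2]
        simp only [if_pos hq2, if_pos h1]
        rw [PySem.Dict.getD_insert_of_ne _ _ _ hq]
        have herase : (new.erase k).getD q [] = new.getD q [] := by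
          simp [PySem.Dict.getD, get?_erase_of_ne new k q hq]
        rw [herase]
      · have : q ∉ k :: ks' := by simp [hq, hq2]
        simp only [if_neg hq2, if_neg this]
        rw [PySem.Dict.getD_insert_of_ne _ _ _ hq]

theorem erase_fold_items (ks : List String) : ∀ (d : Dct),
    (ks.foldl (fun n k => n.erase k) d).items
      = d.items.filter (fun p => decide (p.1 ∉ ks)) := by
  induction ks with
  | nil => intro d; simp
  | cons k ks' IH =>
    intro d
    simp only [List.foldl_cons]
    rw [IH (d.erase k)]
    show (List.filter _ (List.filter _ d.items)) = _
    rw [List.filter_filter]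
    apply List.filter_congr
    intro p _
    by_cases h1 : p.1 = k
    · simp [h1]
    · simp [h1]

-- ===== assembly =====

theorem main_eq (CFG : List (String × List (List String)))
    (hnd : (CFG.map Prod.fst).Nodup) :
    simplyfyVariabel CFG = simplyfyVariabel_alt CFG := by
  unfold simplyfyVariabel simplyfyVariabel_alt
  dsimp only
  rw [phase1_items]
  dsimp only
  -- names for the shared pieces
  set C : Dct := PySem.Dict.mk CFG with hCdef
  have hCitems : C.items = CFG := rfl
  have hCkeys : C.keys = CFG.map Prod.fst := by
    simp [hCdef, PySem.Dict.keys]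
  have hCnd : C.keys.Nodup := by rw [hCkeys]; exact hnd
  set N : Dct := (C.items.foldl (fun s hb =>
      hb.2.foldl (fun (s : Dct × Int) rule =>
        if rule.length > 2 then pvBinarize s.1 hb.1 rule s.2 else s) s)
      (PySem.Dict.empty, (0 : Int))).1 with hNdef
  set D : Dct := C.items.foldl (fun d hb =>
      hb.2.foldl (fun d rule => if rule.length > 2 then pvAppendA d hb.1 rule else d) d)
      PySem.Dict.empty with hDdef
  -- facts about N
  have hNfacts := phase1_N_pres C.items PySem.Dict.empty 0
    (by simp) (by intro q r h; simp [PySem.Dict.getD, PySem.Dict.get?, PySem.Dict.empty] at h)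
  rw [← hNdef] at hNfacts
  obtain ⟨hNnd, hNshort⟩ := hNfacts
  have hNndf : (N.items.map Prod.fst).Nodup := hNnd
  -- facts about D
  have hDg := dfold_getD C.items (by rw [hCitems]; exact hnd)
  rw [hCitems, ← hDdef] at hDg
  obtain ⟨hDmem, hDnone⟩ := hDg
  have hDk := dfold_keys C.items
  rw [hCitems, ← hDdef] at hDk
  obtain ⟨hDnd, hDsub⟩ := hDk
  have hDeta : PySem.Dict.mk D.items = D := rfl
  -- A's merge phase
  obtain ⟨hm1, hm2⟩ := mergeA_char N.items C hNndf
  have hNeta : PySem.Dict.mk N.items = N := rfl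
  rw [hNeta] at hm2
  set cfg1 : Dct := N.items.foldl (fun cfg kv =>
      if cfg.contains kv.1 = false then cfg.insert kv.1 kv.2
      else cfg.modify kv.1 [] (fun l => l ++ kv.2)) C with hcfg1
  set fK : List String :=
    (N.items.filter (fun kv => decide (C.contains kv.1 = false))).map Prod.fst with hfK
  -- A's removal phase
  have hcont1 : ∀ kv ∈ D.items, cfg1.contains kv.1 = true := by
    intro kv hkv
    have h1 : kv.1 ∈ D.keys := List.mem_map.mpr ⟨kv, hkv, rfl⟩
    have h2 : kv.1 ∈ C.keys := by rw [hCkeys]; exact hDsub kv.1 h1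
    rw [PySem.Dict.contains_iff_mem_keys, hm1]
    exact List.mem_append_left _ h2
  obtain ⟨hr1, hr2⟩ := removal_char D.items cfg1 hDnd hcont1
  rw [hDeta] at hr2
  set A2 : Dct := D.items.foldl (fun cfg kv =>
      kv.2.foldl (fun cfg r =>
        cfg.modify kv.1 [] (fun l => (PySem.List.remove? l r).getD l)) cfg) cfg1 with hA2
  -- B's phase 2
  obtain ⟨hb1, hb2, hb3⟩ := bphase_char C.keys C N hCnd
    (fun k hk => (PySem.Dict.contains_iff_mem_keys _ _).mpr hk)
  set cfgB : Dct := (C.keys.foldl (fun (t : Dct × Dct) head =>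
      (t.1.insert head (((t.1.getD head []).filter (fun r => r.length ≤ 2)) ++ t.2.getD head []),
       t.2.erase head)) (C, N)).1 with hcfgB
  set newB : Dct := (C.keys.foldl (fun (t : Dct × Dct) head =>
      (t.1.insert head (((t.1.getD head []).filter (fun r => r.length ≤ 2)) ++ t.2.getD head []),
       t.2.erase head)) (C, N)).2 with hnewB
  have hnewBitems : newB.items = N.items.filter (fun p => decide (p.1 ∉ C.keys)) := by
    rw [hb1, erase_fold_items]
  -- the update loop appends fresh keys
  have hfresh : ∀ p ∈ newB.items, cfgB.contains p.1 = false := by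
    intro p hp
    rw [hnewBitems] at hp
    have hnot : p.1 ∉ C.keys := by
      have := List.of_mem_filter hp
      simpa using this
    rw [PySem.Dict.contains_eq_decide_mem_keys, hb2]
    exact decide_eq_false hnot
  have hnewBnd : (newB.items.map Prod.fst).Nodup := by
    rw [hnewBitems]
    exact hNndf.sublist (List.Sublist.map _ List.filter_sublist)
  have hupd := PySem.Dict.items_foldl_insert_fresh newB.items Prod.fst Prod.snd cfgB hfresh hnewBnd
  rw [hupd]
  have hmapid : newB.items.map (fun a => (a.1, a.2)) = newB.items := by
    simp
  rw [hmapid]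
  -- item lists via keys + getD
  have hA2keys : A2.keys = C.keys ++ fK := by rw [hA2] at hr1 ⊢; rw [hr1, hm1]
  have hfKnd : fK.Nodup := by
    rw [hfK]
    exact hNndf.sublist (List.Sublist.map _ List.filter_sublist)
  have hfKnotC : ∀ x ∈ fK, x ∉ C.keys := by
    intro x hx hmem
    rw [hfK] at hx
    rcases List.mem_map.mp hx with ⟨kv, hkv, rfl⟩
    have hpv := List.of_mem_filter hkv
    rw [PySem.Dict.contains_eq_decide_mem_keys, decide_eq_true_eq] at hpv
    simp [hmem] at hpv
  have hA2nd : A2.keys.Nodup := by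
    rw [hA2keys, List.nodup_append]
    refine ⟨hCnd, hfKnd, ?_⟩
    intro a ha b hb e
    exact hfKnotC b hb (e ▸ ha)
  have hAitems : A2.items = (C.keys ++ fK).map (fun q => (q, A2.getD q [])) := by
    rw [← hA2keys]
    exact PySem.Dict.items_eq_map_keys A2 hA2nd []
  have hcfgBnd : cfgB.keys.Nodup := by rw [hb2]; exact hCnd
  have hBitems : cfgB.items = C.keys.map (fun q => (q, cfgB.getD q [])) := by
    have := PySem.Dict.items_eq_map_keys cfgB hcfgBnd []
    rw [hb2] at this
    exact this
  rw [hAitems, hBitems, List.map_append]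
  -- part 1: the original heads
  have hpart1 : C.keys.map (fun q => (q, A2.getD q []))
      = C.keys.map (fun q => (q, cfgB.getD q [])) := by
    apply List.map_congr_left
    intro q hq
    rcases List.mem_map.mp (by rw [hCkeys] at hq; exact hq) with ⟨p, hp, hpq⟩
    have hpmem : (q, p.2) ∈ CFG := by
      cases p with
      | mk p1 p2 => cases hpq; exact hp
    have hCb : C.getD q [] = p.2 :=
      PySem.Dict.getD_of_mem_items C (by rw [hCitems]; exact hpmem) hCnd []
    have hDq : D.getD q [] = p.2.filter isLong := hDmem q p.2 hpmem
    have hB : cfgB.getD q [] = p.2.filter isShort ++ N.getD q [] := by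
      rw [hb3 q, if_pos hq, hCb]
    have hcfg1q : cfg1.getD q [] = p.2 ++ N.getD q [] := by
      rw [hm2 q, hCb]
    congr 1
    rw [hB, hr2 q]
    cases hcase : D.get? q with
    | some v =>
      have hv : v = p.2.filter isLong := by
        have := PySem.Dict.getD_of_get?_eq_some D [] hcase
        rw [hDq] at this
        exact this.symm
      rw [hv, hcfg1q]
      exact remove_eq_filter p.2 (N.getD q []) (fun r hr => hNshort q r hr)
    | none =>
      have hnil : p.2.filter isLong = [] := by
        rw [← hDq]
        simp [PySem.Dict.getD, hcase]
      have hall : ∀ r ∈ p.2, r.length ≤ 2 := by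
        intro r hr
        have := List.filter_eq_nil_iff.mp hnil r hr
        simp [isLong] at this
        omega
      have hself : p.2.filter isShort = p.2 :=
        List.filter_eq_self.mpr (fun r hr => by simp [isShort, hall r hr])
      rw [hcfg1q, hself]
  rw [hpart1]
  -- part 2: the fresh X-heads
  have hNitems : N.items = N.keys.map (fun q => (q, N.getD q [])) :=
    PySem.Dict.items_eq_map_keys N hNnd []
  have hpred : ∀ q, (decide (C.contains q = false)) = (decide (q ∉ C.keys)) := by
    intro q
    rw [PySem.Dict.contains_eq_decide_mem_keys]
    by_cases h : q ∈ C.keys <;> simp [h]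
  have hfK2 : fK = N.keys.filter (fun q => decide (q ∉ C.keys)) := by
    rw [hfK, hNitems, List.filter_map, List.map_map]
    simp only [Function.comp_def]
    simp only [hpred]
    simp
  have hnewB2 : newB.items
      = (N.keys.filter (fun q => decide (q ∉ C.keys))).map (fun q => (q, N.getD q [])) := by
    rw [hnewBitems, hNitems, List.filter_map]
    congr 1
  have hpart2 : fK.map (fun q => (q, A2.getD q [])) = newB.items := by
    rw [hnewB2, hfK2]
    apply List.map_congr_left
    intro q hq
    have hqnotC : q ∉ C.keys := by
      have := List.of_mem_filter hq
      simpa using this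
    have hDnoneq : D.get? q = none := by
      rw [PySem.Dict.get?_eq_none_iff_not_mem_keys]
      intro hmem
      exact hqnotC (by rw [hCkeys]; exact hDsub q hmem)
    have hCcont : C.contains q = false := by
      rw [PySem.Dict.contains_eq_decide_mem_keys]
      exact decide_eq_false hqnotC
    congr 1
    rw [hr2 q, hDnoneq, hm2 q, PySem.Dict.getD_of_not_contains _ _ hCcont]
    simp
  rw [hpart2]


-- ===== VERDICT (by name: the statement is the Claim_ definition above) =====
theorem simplyfyVariabel_spec : Claim_equal_simplyfyVariabel := by
  intro CFG _ hpre
  show simplyfyVariabel CFG = simplyfyVariabel_alt CFG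
  exact main_eq CFG hpre
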